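-- pv_equiv track=rewrite | github.com/cirosantilli/project-euler-solvers | solvers/662.py | step_vectors_upto
-- ===== SOURCE A (Python) =====
-- from math import isqrt
--
-- def fibs_upto(n: int):
--     """Return Fibonacci numbers {1,2,3,5,...} up to n (inclusive)."""
--     if n < 1:
--         return []
--     fibs = [1, 2]
--     while fibs[-1] + fibs[-2] <= n:
--         fibs.append(fibs[-1] + fibs[-2])
--     return fibs
--
-- def step_vectors_upto(n: int):
--     """
--     Generate all nonnegative integer step vectors (dx,dy) such that:
--         dx^2 + dy^2 = f^2
--     for some Fibonacci f <= n.
--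
--     Returns a list of unique (dx,dy) excluding (0,0).
--     """
--     fibs = fibs_upto(n)
--     steps = set()
--     for f in fibs:
--         ff = f * f
--         for dx in range(0, f + 1):
--             dy2 = ff - dx * dx
--             dy = isqrt(dy2)
--             if dy * dy == dy2:
--                 if dx == 0 and dy == 0:
--                     continue
--                 steps.add((dx, dy))
--     return sorted(steps)
-- ===== SOURCE B (Python) =====
-- def step_vectors_upto(n: int):
--     """
--     Same task as A, but each radius is processed by a two-pointer sweep
--     (x up from 0, y down from f) that finds all x^2 + y^2 = f^2 without
--     ever computing a square root; Fibonacci radii come from a rolling pair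
--     (so only f <= n are used).
--     """
--     steps = set()
--     a, b = 1, 2
--     while a <= n:
--         ff = a * a
--         x, y = 0, a
--         while x <= y:
--             s = x * x + y * y
--             if s == ff:
--                 steps.add((x, y))
--                 steps.add((y, x))
--                 x += 1
--                 y -= 1
--             elif s < ff:
--                 x += 1
--             else:
--                 y -= 1
--         a, b = b, a + b
--     return sorted(steps)
-- ===== Notes on version B (the rewrite author's own statement) =====
-- stated objective: alternative
-- what changed: B replaces A's per-radius trial scan with isqrt perfect-square checks by a two-pointer sweep (x ascending from 0, y descending from f, comparing x*x+y*y with f*f) that never computes a square root, and generates Fibonacci radii with a rolling pair (using only f <= n, which fixes A's off-by-one at n = 1).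
-- intended difference: For n = 1 A seeds its Fibonacci list with the next Fibonacci number above n as well, so it returns [(0,1),(0,2),(1,0),(2,0)], contradicting its own 'Fibonacci f <= n' contract; B returns only [(0,1),(1,0)], the intended value. — e.g. on step_vectors_upto(1): A returns [(0, 1), (0, 2), (1, 0), (2, 0)], B returns [(0, 1), (1, 0)]
import Mathlib
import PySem

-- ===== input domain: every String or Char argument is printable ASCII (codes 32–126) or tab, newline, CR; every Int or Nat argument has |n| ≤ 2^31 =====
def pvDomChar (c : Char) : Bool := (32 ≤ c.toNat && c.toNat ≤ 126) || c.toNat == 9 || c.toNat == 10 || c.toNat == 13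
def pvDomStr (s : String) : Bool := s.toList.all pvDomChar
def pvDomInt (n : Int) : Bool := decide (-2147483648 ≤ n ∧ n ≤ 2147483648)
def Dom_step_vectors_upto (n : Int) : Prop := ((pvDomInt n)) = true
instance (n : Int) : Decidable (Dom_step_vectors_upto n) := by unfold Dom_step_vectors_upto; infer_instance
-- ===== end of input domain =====

-- B finds the lattice points of each radius by a two-pointer sweep (x up from 0, y down from f)
-- with no square roots, and generates the Fibonacci radii with a rolling pair (which also fixes
-- A's off-by-one at n = 1).

-- ===== PORT A =====
-- math.isqrt(k) for k ≥ 0 (the only arguments A passes to it): hand-ported,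
-- digit-by-digit recursion; proved equal to Nat.sqrt below (isqrtGo_eq_sqrt), so exact there
def isqrtGo : Nat → Nat → Nat
  | 0, _ => 0
  | fuel + 1, n =>
    if n = 0 then 0
    else
      let r := 2 * isqrtGo fuel (n / 4)
      if (r + 1) * (r + 1) ≤ n then r + 1 else r

def pyIsqrt (k : Int) : Int := (isqrtGo k.toNat k.toNat : Nat)

-- 'while fibs[-1] + fibs[-2] <= n: fibs.append(fibs[-1] + fibs[-2])' with a = fibs[-2], b = fibs[-1];
-- the fuel only makes the loop total: n.toNat + 2 always suffices (the last entry grows each turn)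
def fibsUptoGo (n : Int) : Nat → Int → Int → List Int → List Int
  | 0, _, _, fibs => fibs
  | fuel + 1, a, b, fibs =>
    if b + a ≤ n then fibsUptoGo n fuel b (a + b) (fibs ++ [a + b]) else fibs

def fibs_upto (n : Int) : List Int :=
  if n < 1 then [] else fibsUptoGo n (n.toNat + 2) 1 2 [1, 2]

-- A's inner 'for dx in range(0, f + 1)' loop over one Fibonacci radius f
def stepsForF (f : Int) (steps : PySem.Set (Int × Int)) : PySem.Set (Int × Int) :=
  let ff := f * f
  (PySem.List.pyRange 0 (f + 1)).foldl (fun steps dx =>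
    let dy2 := ff - dx * dx
    let dy := pyIsqrt dy2
    if dy * dy = dy2 then
      if dx = 0 ∧ dy = 0 then steps
      else PySem.Set.add steps (dx, dy)
    else steps) steps

def step_vectors_upto (n : Int) : List (Int × Int) :=
  let fibs := fibs_upto n
  let steps := fibs.foldl (fun steps f => stepsForF f steps) PySem.Set.empty
  PySem.List.sorted2 steps (fun p => p.1) (fun p => p.2)

-- ===== PORT B =====
-- B's inner 'while x <= y' two-pointer sweep for one radius (ff = f*f): no square roots;
-- the fuel only makes the loop total: y - x drops each turn, so (y + 1).toNat from (0, f) suffices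
def twoPtrGo (ff : Int) : Nat → Int → Int → PySem.Set (Int × Int) → PySem.Set (Int × Int)
  | 0, _, _, steps => steps
  | fuel + 1, x, y, steps =>
    if x ≤ y then
      if x * x + y * y = ff then
        twoPtrGo ff fuel (x + 1) (y - 1) (PySem.Set.add (PySem.Set.add steps (x, y)) (y, x))
      else if x * x + y * y < ff then
        twoPtrGo ff fuel (x + 1) y steps
      else
        twoPtrGo ff fuel x (y - 1) steps
    else steps

-- one radius f of B: 'x, y = 0, a' then the sweep
def altStepsFor (f : Int) (steps : PySem.Set (Int × Int)) : PySem.Set (Int × Int) :=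
  twoPtrGo (f * f) (f + 1).toNat 0 f steps

-- B's 'while a <= n' loop over the rolling Fibonacci pair (a, b); fuel only to make it total (as above)
def altGo (n : Int) : Nat → Int → Int → PySem.Set (Int × Int) → PySem.Set (Int × Int)
  | 0, _, _, steps => steps
  | fuel + 1, a, b, steps =>
    if a ≤ n then altGo n fuel b (a + b) (altStepsFor a steps) else steps

def step_vectors_upto_alt (n : Int) : List (Int × Int) :=
  PySem.List.sorted2 (altGo n (n.toNat + 2) 1 2 PySem.Set.empty) (fun p => p.1) (fun p => p.2)

-- ===== PRECONDITION & SPEC =====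
-- For n = 1 A seeds its Fibonacci list with the next Fibonacci number above n as well and so
-- returns the larger radius' points too, contradicting its own 'Fibonacci f <= n' contract;
-- B returns only [(0,1),(1,0)], the intended value.
def D_step_vectors_upto (n : Int) : Prop := n = 1
instance (n : Int) : Decidable (D_step_vectors_upto n) := by unfold D_step_vectors_upto; infer_instance

def Spec_step_vectors_upto (n : Int) (out : List (Int × Int)) : Prop :=
  ¬ D_step_vectors_upto n → out = step_vectors_upto_alt n
instance (n : Int) (out : List (Int × Int)) : Decidable (Spec_step_vectors_upto n out) := by
  unfold Spec_step_vectors_upto; infer_instance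

def pvDiffWitness_step_vectors_upto : Int := 1
def pvDiffWitnessOut_step_vectors_upto : (List (Int × Int)) × (List (Int × Int)) :=
  ([(0, 1), (0, 2), (1, 0), (2, 0)], [(0, 1), (1, 0)])

-- ===== CLAIM (what is proved, stated in full; the proofs are below) =====
def Claim_unchanged_step_vectors_upto : Prop :=
  ∀ (n : Int), Dom_step_vectors_upto n → Spec_step_vectors_upto n (step_vectors_upto n)
def Claim_changed_step_vectors_upto : Prop :=
  Dom_step_vectors_upto (pvDiffWitness_step_vectors_upto) ∧
  D_step_vectors_upto (pvDiffWitness_step_vectors_upto) ∧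
  step_vectors_upto (pvDiffWitness_step_vectors_upto) = pvDiffWitnessOut_step_vectors_upto.1 ∧
  step_vectors_upto_alt (pvDiffWitness_step_vectors_upto) = pvDiffWitnessOut_step_vectors_upto.2 ∧
  pvDiffWitnessOut_step_vectors_upto.1 ≠ pvDiffWitnessOut_step_vectors_upto.2
def Claim_exact_step_vectors_upto : Prop :=
  ∀ (n : Int), Dom_step_vectors_upto n → D_step_vectors_upto n →
    step_vectors_upto n ≠ step_vectors_upto_alt n

-- ===== LEMMAS AND PROOFS =====

-- the hand-ported isqrt is math.isqrt: it agrees with Nat.sqrt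
lemma isqrtGo_eq_sqrt : ∀ (fuel n : Nat), n ≤ fuel → isqrtGo fuel n = Nat.sqrt n := by
  intro fuel
  induction fuel with
  | zero =>
    intro n h
    interval_cases n
    simp [isqrtGo]
  | succ k ih =>
    intro n hn
    rw [isqrtGo]
    by_cases h0 : n = 0
    · simp [h0]
    · rw [if_neg h0]
      have hrec : isqrtGo k (n / 4) = Nat.sqrt (n / 4) := ih _ (by omega)
      dsimp only
      rw [hrec]
      set s := Nat.sqrt (n / 4) with hs
      have hs1 : s * s ≤ n / 4 := Nat.sqrt_le (n / 4)
      have hs2 : n / 4 < (s + 1) * (s + 1) := Nat.lt_succ_sqrt (n / 4)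
      have hlow : 2 * s * (2 * s) ≤ n := by
        have e : 2 * s * (2 * s) = 4 * (s * s) := by ring
        omega
      have hhigh : n < (2 * s + 2) * (2 * s + 2) := by
        have h4 : n < 4 * (n / 4) + 4 := by omega
        nlinarith
      by_cases hcase : (2 * s + 1) * (2 * s + 1) ≤ n
      · rw [if_pos hcase]
        have ha : 2 * s + 1 ≤ Nat.sqrt n := Nat.le_sqrt.mpr hcase
        have hb : Nat.sqrt n < 2 * s + 2 := Nat.sqrt_lt.mpr hhigh
        omega
      · rw [if_neg hcase]
        have ha : 2 * s ≤ Nat.sqrt n := Nat.le_sqrt.mpr hlow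
        have hb : Nat.sqrt n < 2 * s + 1 := Nat.sqrt_lt.mpr (by omega)
        omega

lemma pyIsqrt_eq_sqrt (k : Int) : pyIsqrt k = (Nat.sqrt k.toNat : Int) := by
  unfold pyIsqrt
  rw [isqrtGo_eq_sqrt _ _ le_rfl]

lemma pyIsqrt_nonneg (k : Int) : 0 ≤ pyIsqrt k := Int.natCast_nonneg _

lemma pyIsqrt_mul_self (y : Int) (h : 0 ≤ y) : pyIsqrt (y * y) = y := by
  rw [pyIsqrt_eq_sqrt]
  lift y to Nat using h
  rw [← Nat.cast_mul, Int.toNat_natCast, Nat.sqrt_eq]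

-- the sequence of Fibonacci values B's while-loop processes (proof-side only)
def fibSeq (n : Int) : Nat → Int → Int → List Int
  | 0, _, _ => []
  | fuel + 1, a, b => if a ≤ n then a :: fibSeq n fuel b (a + b) else []

lemma fibSeq_succ (n : Int) (fuel : Nat) (a b : Int) :
    fibSeq n (fuel + 1) a b = if a ≤ n then a :: fibSeq n fuel b (a + b) else [] := rfl

lemma fibSeq_nil (n : Int) (fuel : Nat) (a b : Int) (h : ¬ a ≤ n) : fibSeq n fuel a b = [] := by
  cases fuel <;> simp [fibSeq, h]

lemma altGo_eq_foldl (n : Int) :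
    ∀ (fuel : Nat) (a b : Int) (s : PySem.Set (Int × Int)),
      altGo n fuel a b s = (fibSeq n fuel a b).foldl (fun s f => altStepsFor f s) s := by
  intro fuel
  induction fuel with
  | zero => intro a b s; simp [altGo, fibSeq]
  | succ k ih =>
    intro a b s
    rw [altGo, fibSeq_succ]
    split
    · rw [ih]; rfl
    · rfl

lemma fibsUptoGo_eq (n : Int) :
    ∀ (fuel : Nat) (a b : Int) (acc : List Int),
      fibsUptoGo n fuel a b acc = acc ++ fibSeq n fuel (a + b) (a + 2 * b) := by
  intro fuel
  induction fuel with
  | zero => intro a b acc; simp [fibsUptoGo, fibSeq]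
  | succ k ih =>
    intro a b acc
    rw [fibsUptoGo, fibSeq_succ]
    by_cases h : a + b ≤ n
    · rw [if_pos (by omega : b + a ≤ n), if_pos h, ih]
      have h1 : b + (a + b) = a + 2 * b := by ring
      have h2 : b + 2 * (a + b) = (a + b) + (a + 2 * b) := by ring
      rw [h1, h2]
      simp
    · rw [if_neg (by omega : ¬ b + a ≤ n), if_neg h, List.append_nil]

lemma fibSeq_fuel_irrel (n : Int) :
    ∀ (f1 f2 : Nat) (a b : Int), 1 ≤ a → a < b →
      (n - a).toNat < f1 → (n - a).toNat < f2 →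
      fibSeq n f1 a b = fibSeq n f2 a b := by
  intro f1
  induction f1 with
  | zero => omega
  | succ k ih =>
    intro f2 a b ha hab h1 h2
    obtain ⟨k2, rfl⟩ : ∃ k2, f2 = k2 + 1 := ⟨f2 - 1, by omega⟩
    rw [fibSeq_succ, fibSeq_succ]
    by_cases hle : a ≤ n
    · rw [if_pos hle, if_pos hle]
      by_cases hb : b ≤ n
      · rw [ih k2 b (a + b) (by omega) (by omega) (by omega) (by omega)]
      · rw [fibSeq_nil n k b _ hb, fibSeq_nil n k2 b _ hb]
    · rw [if_neg hle, if_neg hle]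

lemma fibSeq_pos (n : Int) :
    ∀ (fuel : Nat) (a b : Int), 1 ≤ a → 1 ≤ b → ∀ f ∈ fibSeq n fuel a b, 1 ≤ f := by
  intro fuel
  induction fuel with
  | zero => simp [fibSeq]
  | succ k ih =>
    intro a b ha hb f hf
    rw [fibSeq_succ] at hf
    split at hf
    · rcases List.mem_cons.mp hf with rfl | hf
      · exact ha
      · exact ih b (a + b) hb (by omega) f hf
    · simp at hf

-- outside n = 1, A's Fibonacci list is exactly the sequence B's loop walks
lemma fibs_eq (n : Int) (h : n ≠ 1) : fibs_upto n = fibSeq n (n.toNat + 2) 1 2 := by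
  unfold fibs_upto
  by_cases hn : n < 1
  · rw [if_pos hn, fibSeq_nil n _ 1 2 (by omega)]
  · have hn2 : 2 ≤ n := by omega
    have hR : fibSeq n (n.toNat + 2) 1 2 = 1 :: 2 :: fibSeq n n.toNat 3 5 := by
      rw [show n.toNat + 2 = (n.toNat + 1) + 1 from rfl,
        fibSeq_succ, if_pos (by omega : (1:Int) ≤ n),
        fibSeq_succ, if_pos (by omega : (2:Int) ≤ n)]
      norm_num
    rw [if_neg hn, fibsUptoGo_eq, hR,
      fibSeq_fuel_irrel n (n.toNat + 2) n.toNat (1 + 2) (1 + 2 * 2)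
        (by omega) (by omega) (by omega) (by omega)]
    norm_num

lemma mem_foldl_body {P : Int → (Int × Int) → Prop}
    (body : PySem.Set (Int × Int) → Int → PySem.Set (Int × Int)) :
    ∀ (l : List Int),
      (∀ d ∈ l, ∀ s x, x ∈ body s d ↔ x ∈ s ∨ P d x) →
      ∀ s x, x ∈ l.foldl body s ↔ x ∈ s ∨ ∃ d ∈ l, P d x := by
  intro l
  induction l with
  | nil => simp
  | cons a t ih =>
    intro h s x
    rw [List.foldl_cons, ih (fun d hd => h d (List.mem_cons_of_mem _ hd)),
      h a List.mem_cons_self]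
    simp only [List.mem_cons]
    constructor
    · rintro ((hx | hx) | ⟨d, hd, hx⟩)
      · exact Or.inl hx
      · exact Or.inr ⟨a, Or.inl rfl, hx⟩
      · exact Or.inr ⟨d, Or.inr hd, hx⟩
    · rintro (hx | ⟨d, rfl | hd, hx⟩)
      · exact Or.inl (Or.inl hx)
      · exact Or.inl (Or.inr hx)
      · exact Or.inr ⟨d, hd, hx⟩

lemma nodup_foldl_body
    (body : PySem.Set (Int × Int) → Int → PySem.Set (Int × Int))
    (h : ∀ s d, s.Nodup → (body s d).Nodup) :
    ∀ (l : List Int) (s : PySem.Set (Int × Int)), s.Nodup → (l.foldl body s).Nodup := by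
  intro l
  induction l with
  | nil => intro s hs; simpa using hs
  | cons a t ih => intro s hs; rw [List.foldl_cons]; exact ih _ (h s a hs)

-- (dx, dy) is a nonnegative lattice point on the circle of radius f
def Sol (f : Int) (p : Int × Int) : Prop :=
  0 ≤ p.1 ∧ 0 ≤ p.2 ∧ p.1 * p.1 + p.2 * p.2 = f * f

-- membership in A's per-radius loop result
lemma mem_stepsForF (f : Int) (hf : 1 ≤ f) (s : PySem.Set (Int × Int)) (x : Int × Int) :
    x ∈ stepsForF f s ↔ x ∈ s ∨ Sol f x := by
  unfold stepsForF
  rw [mem_foldl_body (P := fun dx x =>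
        pyIsqrt (f * f - dx * dx) * pyIsqrt (f * f - dx * dx) = f * f - dx * dx ∧
        ¬(dx = 0 ∧ pyIsqrt (f * f - dx * dx) = 0) ∧ x = (dx, pyIsqrt (f * f - dx * dx)))]
  · constructor
    · rintro (hx | ⟨dx, hdx, hsq, hnz, rfl⟩)
      · exact Or.inl hx
      · refine Or.inr ⟨(PySem.List.mem_pyRange_one.mp hdx).1, pyIsqrt_nonneg _, ?_⟩
        dsimp only
        linarith
    · rintro (hx | ⟨h1, h2, h3⟩)
      · exact Or.inl hx
      · obtain ⟨dx, dy⟩ := x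
        simp only at h1 h2 h3
        have hdxf : dx ≤ f := by nlinarith
        have hdy : f * f - dx * dx = dy * dy := by linarith
        have hiq : pyIsqrt (f * f - dx * dx) = dy := by rw [hdy, pyIsqrt_mul_self dy h2]
        refine Or.inr ⟨dx, PySem.List.mem_pyRange_one.mpr ⟨h1, by omega⟩, ?_, ?_, by rw [hiq]⟩
        · rw [hiq]; linarith
        · rintro ⟨rfl, h0⟩
          rw [hiq] at h0
          nlinarith
  · intro d _ s x
    dsimp only
    split_ifs with h1 h2
    · tauto
    · simp only [PySem.Set.mem_add]
      tauto
    · tauto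

-- two-pointer invariant: the sweep from (x, y) adds exactly the solutions u ≤ v inside [x, y]
lemma mem_twoPtrGo (ff : Int) :
    ∀ (fuel : Nat) (x y : Int) (s : PySem.Set (Int × Int)), 0 ≤ x → (y - x + 1).toNat ≤ fuel →
    ∀ p : Int × Int, (p ∈ twoPtrGo ff fuel x y s ↔ p ∈ s ∨
      ∃ u v : Int, x ≤ u ∧ u ≤ v ∧ v ≤ y ∧ u * u + v * v = ff ∧ (p = (u, v) ∨ p = (v, u))) := by
  intro fuel
  induction fuel with
  | zero =>
    intro x y s hx hfuel p
    rw [twoPtrGo]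
    constructor
    · exact Or.inl
    · rintro (hp | ⟨u, v, h1, h2, h3, _, _⟩)
      · exact hp
      · omega
  | succ k ih =>
    intro x y s hx hfuel p
    rw [twoPtrGo]
    by_cases h : x ≤ y
    · rw [if_pos h]
      by_cases heq : x * x + y * y = ff
      · rw [if_pos heq, ih (x + 1) (y - 1) _ (by omega) (by omega) p]
        simp only [PySem.Set.mem_add]
        constructor
        · rintro (((hp | rfl) | rfl) | ⟨u, v, h1, h2, h3, h4, h5⟩)
          · exact Or.inl hp
          · exact Or.inr ⟨x, y, le_refl x, h, le_refl y, heq, Or.inl rfl⟩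
          · exact Or.inr ⟨x, y, le_refl x, h, le_refl y, heq, Or.inr rfl⟩
          · exact Or.inr ⟨u, v, by omega, h2, by omega, h4, h5⟩
        · rintro (hp | ⟨u, v, h1, h2, h3, h4, h5⟩)
          · exact Or.inl (Or.inl (Or.inl hp))
          · by_cases hux : u = x
            · subst hux
              have hsq : v * v = y * y := by linarith
              have hvy : v = y := by
                rcases mul_self_eq_mul_self_iff.mp hsq with hc | hc <;> omega
              subst hvy
              rcases h5 with rfl | rfl
              · exact Or.inl (Or.inl (Or.inr rfl))
              · exact Or.inl (Or.inr rfl)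
            · have hvy : v ≠ y := by
                intro hvy; subst hvy
                have hsq : u * u = x * x := by linarith
                rcases mul_self_eq_mul_self_iff.mp hsq with hc | hc <;> omega
              exact Or.inr ⟨u, v, by omega, h2, by omega, h4, h5⟩
      · rw [if_neg heq]
        by_cases hlt : x * x + y * y < ff
        · rw [if_pos hlt, ih (x + 1) y _ (by omega) (by omega) p]
          constructor
          · rintro (hp | ⟨u, v, h1, h2, h3, h4, h5⟩)
            · exact Or.inl hp
            · exact Or.inr ⟨u, v, by omega, h2, h3, h4, h5⟩
          · rintro (hp | ⟨u, v, h1, h2, h3, h4, h5⟩)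
            · exact Or.inl hp
            · have hux : u ≠ x := by
                intro hux; subst hux
                have hvy2 : v * v ≤ y * y := mul_le_mul h3 h3 (by omega) (by omega)
                linarith
              exact Or.inr ⟨u, v, by omega, h2, h3, h4, h5⟩
        · rw [if_neg hlt, ih x (y - 1) _ hx (by omega) p]
          constructor
          · rintro (hp | ⟨u, v, h1, h2, h3, h4, h5⟩)
            · exact Or.inl hp
            · exact Or.inr ⟨u, v, h1, h2, by omega, h4, h5⟩
          · rintro (hp | ⟨u, v, h1, h2, h3, h4, h5⟩)
            · exact Or.inl hp
            · have hvy : v ≠ y := by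
                intro hvy; subst hvy
                have hxu : x * x ≤ u * u := mul_le_mul h1 h1 hx (by omega)
                exact heq (by linarith)
              exact Or.inr ⟨u, v, h1, h2, by omega, h4, h5⟩
    · rw [if_neg h]
      constructor
      · exact Or.inl
      · rintro (hp | ⟨u, v, h1, h2, h3, _, _⟩)
        · exact hp
        · omega

-- membership in B's per-radius two-pointer result
lemma mem_altStepsFor (f : Int) (hf : 1 ≤ f) (s : PySem.Set (Int × Int)) (x : Int × Int) :
    x ∈ altStepsFor f s ↔ x ∈ s ∨ Sol f x := by
  unfold altStepsFor
  rw [mem_twoPtrGo (f * f) (f + 1).toNat 0 f s le_rfl (by omega) x]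
  constructor
  · rintro (hx | ⟨u, v, h1, h2, h3, h4, rfl | rfl⟩)
    · exact Or.inl hx
    · exact Or.inr ⟨h1, by omega, h4⟩
    · exact Or.inr ⟨by omega, h1, by linarith⟩
  · rintro (hx | ⟨ha, hb, hsum⟩)
    · exact Or.inl hx
    · obtain ⟨a, b⟩ := x
      simp only at ha hb hsum
      rcases le_total a b with hab | hab
      · exact Or.inr ⟨a, b, ha, hab, by nlinarith, hsum, Or.inl rfl⟩
      · exact Or.inr ⟨b, a, hb, hab, by nlinarith, by linarith, Or.inr rfl⟩

lemma nodup_stepsForF (s : PySem.Set (Int × Int)) (f : Int) (hs : s.Nodup) :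
    (stepsForF f s).Nodup := by
  unfold stepsForF
  apply nodup_foldl_body _ _ _ _ hs
  intro s d hsn
  dsimp only
  split_ifs
  · exact hsn
  · exact PySem.Set.nodup_add _ _ hsn
  · exact hsn

lemma nodup_twoPtrGo (ff : Int) :
    ∀ (fuel : Nat) (x y : Int) (s : PySem.Set (Int × Int)), s.Nodup →
      (twoPtrGo ff fuel x y s).Nodup := by
  intro fuel
  induction fuel with
  | zero => intro x y s hs; simpa [twoPtrGo] using hs
  | succ k ih =>
    intro x y s hs
    rw [twoPtrGo]
    split_ifs
    · exact ih _ _ _ (PySem.Set.nodup_add _ _ (PySem.Set.nodup_add _ _ hs))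
    · exact ih _ _ _ hs
    · exact ih _ _ _ hs
    · exact hs

lemma nodup_altStepsFor (s : PySem.Set (Int × Int)) (f : Int) (hs : s.Nodup) :
    (altStepsFor f s).Nodup := nodup_twoPtrGo _ _ _ _ _ hs

-- Python's tuple sort (sorted2 on fst/snd) is the sort by the lexicographic key
lemma sorted2_eq_sorted_lex (xs : List (Int × Int)) :
    PySem.List.sorted2 xs (fun p => p.1) (fun p => p.2) =
      PySem.List.sorted xs (fun p => toLex p) := by
  have hbefore : (fun (a b : Int × Int) =>
        decide (a.1 < b.1) || (!decide (b.1 < a.1) && decide (a.2 < b.2)))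
      = fun (a b : Int × Int) => decide (toLex a < toLex b) := by
    funext a b
    rw [Bool.eq_iff_iff]
    simp only [Prod.Lex.toLex_lt_toLex, Bool.or_eq_true, Bool.and_eq_true,
      Bool.not_eq_true', decide_eq_true_eq, decide_eq_false_iff_not]
    omega
  rw [show PySem.List.sorted2 xs (fun p => p.1) (fun p => p.2) =
        xs.foldl (fun acc x => PySem.List.insertBy
          (fun a b => decide (a.1 < b.1) || (!decide (b.1 < a.1) && decide (a.2 < b.2))) x acc) []
        from rfl,
      show PySem.List.sorted xs (fun p => toLex p) =
        xs.foldl (fun acc x => PySem.List.insertBy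
          (fun a b => decide (toLex a < toLex b)) x acc) [] from rfl,
      hbefore]

lemma sorted2_eq_of_perm (s t : List (Int × Int)) (h : s.Perm t) :
    PySem.List.sorted2 s (fun p => p.1) (fun p => p.2) =
      PySem.List.sorted2 t (fun p => p.1) (fun p => p.2) := by
  rw [sorted2_eq_sorted_lex, sorted2_eq_sorted_lex]
  exact PySem.List.sorted_eq_sorted_of_perm s t _ toLex.injective h

-- ===== VERDICT (by name: the statement is the Claim_ definition above) =====
theorem step_vectors_upto_spec : Claim_unchanged_step_vectors_upto := by
  intro n _ hD
  have hn : n ≠ 1 := hD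
  unfold step_vectors_upto step_vectors_upto_alt
  rw [altGo_eq_foldl, fibs_eq n hn]
  dsimp only
  set L := fibSeq n (n.toNat + 2) 1 2 with hL
  have hpos : ∀ f ∈ L, 1 ≤ f := fibSeq_pos n _ 1 2 (by omega) (by omega)
  apply sorted2_eq_of_perm
  rw [List.perm_ext_iff_of_nodup
    (nodup_foldl_body _ (fun s f hs => nodup_stepsForF s f hs) L PySem.Set.empty
      List.nodup_nil)
    (nodup_foldl_body _ (fun s f hs => nodup_altStepsFor s f hs) L PySem.Set.empty
      List.nodup_nil)]
  intro x
  rw [mem_foldl_body (P := Sol) _ L (fun f hf s x => mem_stepsForF f (hpos f hf) s x),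
      mem_foldl_body (P := Sol) _ L (fun f hf s x => mem_altStepsFor f (hpos f hf) s x)]

theorem step_vectors_upto_changed : Claim_changed_step_vectors_upto := by
  unfold Claim_changed_step_vectors_upto; decide

theorem step_vectors_upto_tight : Claim_exact_step_vectors_upto := by
  intro n _ hD
  have h1 : n = 1 := hD
  subst h1
  decide
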